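-- pv_equiv track=rewrite | github.com/AbdallahZerfaoui/PokerCalculator | version 1.0/basic_functions.py | detect
-- ===== SOURCE A (Python) =====
-- def detect(L_poss): # fonction qui renvoie les caracteres répétés sur une nouvelle liste
--     traitement=[] # initialisation
--     doublon=[] # initialisation
--
--     for carte in L_poss:
--         if carte[0] not in traitement:
--             traitement.append(carte[0])
--         else:
--             doublon.append(carte[0]) # si carte[0] est deja ds traitement alors on l'ajoute a la liste doublon
--     return doublon
-- ===== SOURCE B (Python) =====
-- def detect(L_poss):
--     # First pass: record the index of the first occurrence of each distinct carte[0].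
--     first = {}
--     for i, carte in enumerate(L_poss):
--         k = carte[0]
--         if k not in first:
--             first[k] = i
--     # Second pass: an element is a repeat exactly when its index is not the recorded first one.
--     out = []
--     for i, carte in enumerate(L_poss):
--         k = carte[0]
--         if first[k] != i:
--             out.append(k)
--     return out
-- ===== Notes on version B (the rewrite author's own statement) =====
-- stated objective: alternative
-- what changed: Replaces the single pass with a growing seen-list (repeated membership scans) by two passes: a dict of first-occurrence indices built up front, then an index-comparison filter that emits carte[0] whenever its index is not the recorded first one.
import Mathlib
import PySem

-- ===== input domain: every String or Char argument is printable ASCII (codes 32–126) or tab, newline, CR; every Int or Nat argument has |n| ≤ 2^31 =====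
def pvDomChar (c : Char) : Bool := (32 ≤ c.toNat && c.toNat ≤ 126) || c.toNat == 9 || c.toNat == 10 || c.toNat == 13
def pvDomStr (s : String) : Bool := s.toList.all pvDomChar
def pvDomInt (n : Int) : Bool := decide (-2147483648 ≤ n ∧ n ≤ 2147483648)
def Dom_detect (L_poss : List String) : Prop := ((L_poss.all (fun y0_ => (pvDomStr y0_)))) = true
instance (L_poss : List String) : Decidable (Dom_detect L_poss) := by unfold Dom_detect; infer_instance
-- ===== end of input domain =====

-- B replaces A's growing seen-list pass by a first-occurrence-index table plus an index-comparison filter pass (alternative decomposition).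


-- carte[0]: first character of the string as a 1-character string (none = IndexError on "")
def pvFirst? (s : String) : Option String :=
  (PySem.Str.pyGet? s 0).map (fun c => String.ofList [c])

-- ===== PORT A =====
def detect (L_poss : List String) : List String :=
  (L_poss.foldl
    (fun (st : List String × List String) carte =>
      match pvFirst? carte with
      | none => st          -- unreachable under Pre_detect
      | some k =>
        if st.1.contains k = false then (st.1 ++ [k], st.2)
        else (st.1, st.2 ++ [k]))
    ([], [])).2

-- ===== PORT B =====
def detect_alt (L_poss : List String) : List String :=
  let first : PySem.Dict String Int :=
    (PySem.List.enumerate L_poss).foldl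
      (fun d p =>
        match pvFirst? p.2 with
        | none => d         -- unreachable under Pre_detect
        | some k => if d.contains k = false then d.insert k p.1 else d)
      PySem.Dict.empty
  (PySem.List.enumerate L_poss).foldl
    (fun out p =>
      match pvFirst? p.2 with
      | none => out         -- unreachable under Pre_detect
      | some k => if first.getD k (-1) ≠ p.1 then out ++ [k] else out)
    []

-- ===== PRECONDITION & SPEC =====
-- Pre_ excludes lists containing the empty string, on which A raises IndexError at carte[0].
def Pre_detect (L_poss : List String) : Prop := ∀ s ∈ L_poss, s ≠ ""
instance (L_poss : List String) : Decidable (Pre_detect L_poss) := by unfold Pre_detect; infer_instance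
def pvWitness_detect : List String := (["as", "ka", "ad"])
def Spec_detect (L_poss : List String) (out : List String) : Prop := out = detect_alt L_poss
instance (L_poss : List String) (out : List String) : Decidable (Spec_detect L_poss out) := by unfold Spec_detect; infer_instance

-- ===== CLAIM (what is proved, stated in full; the proofs are below) =====
def Claim_equal_detect : Prop := ∀ (L_poss : List String), Dom_detect L_poss → Pre_detect L_poss → Spec_detect L_poss (detect L_poss)

-- ===== LEMMAS AND PROOFS =====

-- the common reference recursion: emit k when already seen, then mark it seen
def pvPick : List String → List String → List String
  | [], _ => []
  | k :: ks, seen =>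
    (if seen.contains k then [k] else []) ++ pvPick ks (seen ++ [k])

theorem pvFirst?_isSome (s : String) (h : s ≠ "") : ∃ k, pvFirst? s = some k := by
  have hl : s.toList ≠ [] := by
    intro hc
    apply h
    have := congrArg String.ofList hc
    simpa using this
  cases hcs : s.toList with
  | nil => exact absurd hcs hl
  | cons c cs =>
    refine ⟨String.ofList [c], ?_⟩
    simp [pvFirst?, hcs, PySem.Chars.pyGet?, PySem.List.pyGet?, PySem.List.pyIdx?]

-- pvPick depends on `seen` only through membership
theorem pvPick_congr : ∀ (ks : List String) (t t' : List String),
    (∀ x, x ∈ t ↔ x ∈ t') → pvPick ks t = pvPick ks t'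
  | [], _, _, _ => rfl
  | k :: ks, t, t', h => by
    have hm : t.contains k = t'.contains k := by
      by_cases hk : k ∈ t
      · simp [hk, (h k).mp hk]
      · have hk' : k ∉ t' := fun hc => hk ((h k).mpr hc)
        simp [hk, hk']
    rw [pvPick, pvPick, hm]
    congr 1
    exact pvPick_congr ks (t ++ [k]) (t' ++ [k]) (by intro x; simp [List.mem_append, h x])

-- A's fold produces pvPick
theorem detect_eq_pvPick : ∀ (L : List String) (t d : List String),
    (∀ s ∈ L, s ≠ "") →
    (L.foldl
      (fun (st : List String × List String) carte =>
        match pvFirst? carte with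
        | none => st
        | some k =>
          if st.1.contains k = false then (st.1 ++ [k], st.2)
          else (st.1, st.2 ++ [k]))
      (t, d)).2 = d ++ pvPick (L.filterMap pvFirst?) t := by
  intro L
  induction L with
  | nil => intro t d _; simp [pvPick]
  | cons s L ih =>
    intro t d hne
    obtain ⟨k, hk⟩ := pvFirst?_isSome s (hne s (by simp))
    have hne' : ∀ s' ∈ L, s' ≠ "" := fun s' hs' => hne s' (by simp [hs'])
    rw [List.foldl_cons]
    by_cases hc : t.contains k = true
    · simp only [hk, hc]
      rw [if_neg (show ¬(true = false) by decide)]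
      rw [ih (t) (d ++ [k]) hne', List.filterMap_cons, hk, pvPick, hc, if_pos rfl]
      rw [pvPick_congr (L.filterMap pvFirst?) t (t ++ [k])
        (by intro x; simp [List.mem_append]; intro hx; subst hx; exact List.contains_iff_mem.mp hc)]
      simp
    · rw [Bool.not_eq_true] at hc
      simp only [hk, hc]
      rw [if_pos trivial]
      rw [ih (t ++ [k]) d hne', List.filterMap_cons, hk, pvPick, hc]
      simp

-- first-occurrence index in a list of (index, value) pairs
def pvFidx : List (Int × String) → String → Int
  | [], _ => -1
  | p :: ps, k =>
    match pvFirst? p.2 with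
    | none => pvFidx ps k
    | some k' => if k = k' then p.1 else pvFidx ps k

-- the first-pass dict answers pvFidx
theorem dict_getD_eq_pvFidx : ∀ (ps : List (Int × String)) (d : PySem.Dict String Int) (k : String),
    ((ps.foldl
      (fun d p =>
        match pvFirst? p.2 with
        | none => d
        | some k => if d.contains k = false then d.insert k p.1 else d)
      d).getD k (-1)) = if d.contains k then d.getD k (-1) else pvFidx ps k := by
  intro ps
  induction ps with
  | nil =>
    intro d k
    by_cases hc : d.contains k
    · simp [pvFidx, hc]
    · simp [pvFidx, hc, PySem.Dict.getD_of_not_contains d (-1) (by simpa using hc)]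
  | cons p ps ih =>
    intro d k
    rw [List.foldl_cons, pvFidx]
    cases hp : pvFirst? p.2 with
    | none => simp only [ih]
    | some k' =>
      simp only
      by_cases hck : d.contains k' = true
      · rw [hck]
        rw [if_neg (show ¬(true = false) by decide), ih]
        by_cases hkk : k = k'
        · subst hkk; simp [hck]
        · simp [hkk]
      · rw [Bool.not_eq_true] at hck
        rw [hck, if_pos rfl, ih]
        by_cases hkk : k = k'
        · subst hkk
          simp [hck, PySem.Dict.contains_insert, PySem.Dict.getD_insert_self]
        · have hci : (d.insert k' p.1).contains k = d.contains k := by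
            rw [PySem.Dict.contains_insert]
            simp [show (k == k') = false by simpa using hkk]
          rw [hci, PySem.Dict.getD_insert_of_ne d p.1 (-1) hkk]

          simp [hkk]

-- pvFidx of an enumeration finds the minimal index
theorem pvFidx_min : ∀ (L : List String) (n : Int) (k : String) (j : Nat) (hj : j < L.length),
    pvFirst? (L[j]) = some k →
    (∀ j' (hj' : j' < j), pvFirst? (L[j']'(by omega)) ≠ some k) →
    pvFidx (PySem.List.enumerate L n) k = n + j := by
  intro L
  induction L with
  | nil => intro n k j hj; exact absurd hj (by simp)
  | cons s L ih =>
    intro n k j hj hk hmin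
    rw [PySem.List.enumerate_cons, pvFidx]
    cases j with
    | zero =>
      simp only [List.getElem_cons_zero] at hk
      simp [hk]
    | succ j =>
      have hs : pvFirst? s ≠ some k := by
        have := hmin 0 (by omega)
        simpa using this
      have hk' : pvFirst? (L[j]'(by simpa using hj)) = some k := by
        simpa using hk
      have hmin' : ∀ j' (hj' : j' < j), pvFirst? (L[j']'(by have := hj; simp at this; omega)) ≠ some k := by
        intro j' hj'
        have := hmin (j' + 1) (by omega)
        simpa using this
      have hrec : pvFidx (PySem.List.enumerate L (n + 1)) k = (n + 1) + j :=
        ih (n + 1) k j (by simpa using hj) hk' hmin'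
      cases hp : pvFirst? s with
      | none => rw [hrec]; push_cast; ring
      | some k' =>
        have hkk : k ≠ k' := fun h => hs (h ▸ hp)
        simp only [hp]
        rw [if_neg hkk, hrec]
        push_cast; ring

-- B's second pass produces pvPick, given the index test characterises "seen before"
theorem second_pass_eq_pvPick : ∀ (L : List String) (n : Int) (seen out : List String) (f : String → Int),
    (∀ s ∈ L, s ≠ "") →
    (∀ (j : Nat) (hj : j < L.length) (k : String), pvFirst? (L[j]) = some k →
      (f k ≠ n + j ↔ k ∈ seen ∨ k ∈ (L.take j).filterMap pvFirst?)) →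
    (PySem.List.enumerate L n).foldl
      (fun out p =>
        match pvFirst? p.2 with
        | none => out
        | some k => if f k ≠ p.1 then out ++ [k] else out)
      out = out ++ pvPick (L.filterMap pvFirst?) seen := by
  intro L
  induction L with
  | nil => intro n seen out f _ _; simp [pvPick]
  | cons s L ih =>
    intro n seen out f hne hf
    obtain ⟨k, hk⟩ := pvFirst?_isSome s (hne s (by simp))
    rw [PySem.List.enumerate_cons, List.foldl_cons, List.filterMap_cons, hk, pvPick]
    simp only [hk]
    have h0 : f k ≠ n ↔ k ∈ seen := by
      have := hf 0 (by simp) k (by simpa using hk)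
      simpa using this
    have hstep :
        (if f k ≠ n then out ++ [k] else out)
          = out ++ (if seen.contains k then [k] else []) := by
      by_cases hks : k ∈ seen
      · rw [if_pos (h0.mpr hks), if_pos (List.contains_iff_mem.mpr hks)]
      · rw [if_neg (fun hc => hks (h0.mp hc)),
          if_neg (by simpa using hks)]
        simp
    rw [hstep]
    have hne' : ∀ s' ∈ L, s' ≠ "" := fun s' hs' => hne s' (by simp [hs'])
    have hf' : ∀ (j : Nat) (hj : j < L.length) (k' : String), pvFirst? (L[j]) = some k' →
        (f k' ≠ (n + 1) + j ↔ k' ∈ seen ++ [k] ∨ k' ∈ (L.take j).filterMap pvFirst?) := by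
      intro j hj k' hk'
      have := hf (j + 1) (by simpa using hj) k' (by simpa using hk')
      rw [show (n + ↑(j + 1) : Int) = (n + 1) + j by push_cast; ring] at this
      rw [this]
      rw [List.take_succ_cons, List.filterMap_cons, hk]
      simp [List.mem_append, or_comm, or_assoc, or_left_comm]
    rw [ih (n + 1) (seen ++ [k]) _ f hne' hf']
    simp

-- membership in the keys of a prefix, as an index condition
theorem mem_keys_take (L : List String) (j : Nat) (k : String) :
    k ∈ (L.take j).filterMap pvFirst? ↔
      ∃ i, ∃ h : i < L.length, i < j ∧ pvFirst? (L[i]'h) = some k := by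
  rw [List.mem_filterMap]
  constructor
  · rintro ⟨s, hs, hps⟩
    rw [List.mem_take_iff_getElem] at hs
    obtain ⟨i, hi, rfl⟩ := hs
    exact ⟨i, by omega, by omega, by simpa using hps⟩
  · rintro ⟨i, h, hij, hpi⟩
    exact ⟨L[i], List.mem_take_iff_getElem.mpr ⟨i, by omega, rfl⟩, hpi⟩

-- the final dict's index test says exactly "this key occurred earlier"
theorem dict_test_iff (L : List String) (j : Nat) (hj : j < L.length) (k : String)
    (hk : pvFirst? (L[j]) = some k) :
    pvFidx (PySem.List.enumerate L 0) k ≠ (0 : Int) + j ↔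
      k ∈ (L.take j).filterMap pvFirst? := by
  rw [mem_keys_take]
  by_cases hmem : ∃ i, ∃ h : i < L.length, i < j ∧ pvFirst? (L[i]'h) = some k
  · obtain ⟨i0, hi0, hij0, hpi0⟩ := hmem
    have hex : ∃ i, (L[i]?.bind pvFirst?) = some k :=
      ⟨i0, by rw [List.getElem?_eq_getElem hi0]; simpa using hpi0⟩
    set i1 := Nat.find hex with hi1def
    have hP : (L[i1]?.bind pvFirst?) = some k := Nat.find_spec hex
    have hle : i1 ≤ i0 := Nat.find_le (by rw [List.getElem?_eq_getElem hi0]; simpa using hpi0)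
    have hi1l : i1 < L.length := by
      by_contra hc
      rw [List.getElem?_eq_none (by omega)] at hP
      simp at hP
    have hp1 : pvFirst? (L[i1]'hi1l) = some k := by
      rw [List.getElem?_eq_getElem hi1l] at hP
      simpa using hP
    have hmin : ∀ i' (hi' : i' < i1), pvFirst? (L[i']'(by omega)) ≠ some k := by
      intro i' hi' hc
      exact Nat.find_min hex hi' (by rw [List.getElem?_eq_getElem (by omega)]; simpa using hc)
    have := pvFidx_min L 0 k i1 hi1l hp1 hmin
    rw [this]
    constructor
    · intro _; exact ⟨i1, hi1l, by omega, hp1⟩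
    · intro _ hc; omega
  · have hmin : ∀ i' (hi' : i' < j), pvFirst? (L[i']'(by omega)) ≠ some k := by
      intro i' hi' hc
      exact hmem ⟨i', by omega, hi', hc⟩
    have := pvFidx_min L 0 k j hj hk hmin
    rw [this]
    constructor
    · intro hc; exact absurd rfl hc
    · intro hc; exact absurd hc hmem

-- B computes pvPick too
theorem alt_eq_pvPick (L : List String) (hne : ∀ s ∈ L, s ≠ "") :
    detect_alt L = pvPick (L.filterMap pvFirst?) [] := by
  have hf : ∀ (j : Nat) (hj : j < L.length) (k : String), pvFirst? (L[j]) = some k →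
      ((fun k => ((PySem.List.enumerate L).foldl
        (fun d p =>
          match pvFirst? p.2 with
          | none => d
          | some k => if d.contains k = false then d.insert k p.1 else d)
        PySem.Dict.empty).getD k (-1)) k ≠ (0 : Int) + j ↔
        k ∈ ([] : List String) ∨ k ∈ (L.take j).filterMap pvFirst?) := by
    intro j hj k hk
    have hd := dict_getD_eq_pvFidx (PySem.List.enumerate L) PySem.Dict.empty k
    simp only [PySem.Dict.contains_empty] at hd
    rw [if_neg (by simp)] at hd
    simp only [hd]
    rw [dict_test_iff L j hj k hk]
    simp
  have h2 := second_pass_eq_pvPick L 0 [] []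
    (fun k => ((PySem.List.enumerate L).foldl
      (fun d p =>
        match pvFirst? p.2 with
        | none => d
        | some k => if d.contains k = false then d.insert k p.1 else d)
      PySem.Dict.empty).getD k (-1)) hne hf
  simpa [detect_alt] using h2

-- ===== VERDICT (by name: the statement is the Claim_ definition above) =====
theorem detect_spec : Claim_equal_detect := by
  intro L _ hpre
  unfold Spec_detect
  rw [alt_eq_pvPick L hpre]
  unfold detect
  rw [detect_eq_pvPick L [] [] hpre]
  simp
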